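-- pv_equiv track=rewrite | github.com/marticardoso/AMMM.Project | BRKGA/Utils/Checks.py | CheckMaxPresence
-- ===== SOURCE A (Python) =====
-- def CheckMaxPresence(schedule, maxPresence):
--     ini = len(schedule)
--     end = 0
--     for i in range(len(schedule)):
--         if schedule[i] == 1:
--             ini = min(ini, i)
--             end = max(end, i)
--     presence = end-ini +1
--     return presence <= maxPresence
-- ===== SOURCE B (Python) =====
-- def CheckMaxPresence(schedule, maxPresence):
--     n = len(schedule)
--     ini = n
--     for i, x in enumerate(schedule):
--         if x == 1:
--             ini = i
--             break
--     end = 0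
--     for k, x in enumerate(reversed(schedule)):
--         if x == 1:
--             end = n - 1 - k
--             break
--     return end - ini + 1 <= maxPresence
-- ===== Notes on version B (the rewrite author's own statement) =====
-- stated objective: alternative
-- what changed: A keeps running min/max accumulators over every index; B does two early-exit scans (forward for the first 1, over the reversed list for the last 1) and touches only the elements up to those positions.
import Mathlib
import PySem

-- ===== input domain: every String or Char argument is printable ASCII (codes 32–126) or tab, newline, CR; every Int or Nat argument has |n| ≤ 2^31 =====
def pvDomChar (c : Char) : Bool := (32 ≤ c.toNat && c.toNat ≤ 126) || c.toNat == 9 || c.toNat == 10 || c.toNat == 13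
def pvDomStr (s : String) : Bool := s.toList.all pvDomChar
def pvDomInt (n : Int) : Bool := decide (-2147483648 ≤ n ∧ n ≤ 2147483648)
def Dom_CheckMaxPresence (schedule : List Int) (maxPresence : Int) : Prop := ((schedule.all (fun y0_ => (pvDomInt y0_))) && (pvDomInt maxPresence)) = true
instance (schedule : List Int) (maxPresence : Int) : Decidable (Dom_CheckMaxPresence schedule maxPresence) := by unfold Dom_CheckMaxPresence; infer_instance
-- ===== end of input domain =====

-- B replaces A's full min/max accumulator pass by two early-exit scans
-- (forward for the first 1, over the reversed list for the last 1); return value only, alternative decomposition.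

-- ===== PORT A =====
-- for i in range(len(schedule)): if schedule[i] == 1: ini = min(ini, i); end = max(end, i)
def CheckMaxPresence (schedule : List Int) (maxPresence : Int) : Bool :=
  let p := (PySem.List.enumerate schedule 0).foldl
    (fun (ac : Int × Int) (ix : Int × Int) =>
      if ix.2 = 1 then (min ac.1 ix.1, max ac.2 ix.1) else ac)
    ((schedule.length : Int), 0)
  decide (p.2 - p.1 + 1 ≤ maxPresence)

-- ===== PORT B =====
-- early-exit scan: index (from the front) of the first 1, none if absent
def scanFirst : List Int → Option Int
  | [] => none
  | x :: xs => if x = 1 then some 0 else (scanFirst xs).map (· + 1)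

def CheckMaxPresence_alt (schedule : List Int) (maxPresence : Int) : Bool :=
  let n : Int := schedule.length
  let ini : Int := (scanFirst schedule).getD n
  let e : Int :=
    match scanFirst schedule.reverse with
    | some k => n - 1 - k
    | none => 0
  decide (e - ini + 1 ≤ maxPresence)

-- ===== PRECONDITION & SPEC =====
def Spec_CheckMaxPresence (schedule : List Int) (maxPresence : Int) (out : Bool) : Prop := out = CheckMaxPresence_alt schedule maxPresence
instance (schedule : List Int) (maxPresence : Int) (out : Bool) : Decidable (Spec_CheckMaxPresence schedule maxPresence out) := by unfold Spec_CheckMaxPresence; infer_instance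

-- ===== CLAIM (what is proved, stated in full; the proofs are below) =====
def Claim_equal_CheckMaxPresence : Prop := ∀ (schedule : List Int) (maxPresence : Int), Dom_CheckMaxPresence schedule maxPresence → Spec_CheckMaxPresence schedule maxPresence (CheckMaxPresence schedule maxPresence)

-- ===== LEMMAS AND PROOFS =====

-- proof-only helper: index of the last 1, as a forward structural recursion
def lastIdx? : List Int → Option Int
  | [] => none
  | x :: xs =>
    match lastIdx? xs with
    | some j => some (j + 1)
    | none => if x = 1 then some 0 else none

theorem scanFirst_none_iff (xs : List Int) : scanFirst xs = none ↔ lastIdx? xs = none := by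
  induction xs with
  | nil => simp [scanFirst, lastIdx?]
  | cons x xs ih =>
    simp only [scanFirst, lastIdx?]
    cases hl : lastIdx? xs <;> cases hs : scanFirst xs <;>
      simp_all <;> split_ifs <;> simp_all

theorem scanFirst_bounds (xs : List Int) (i : Int) (h : scanFirst xs = some i) :
    0 ≤ i ∧ i < (xs.length : Int) := by
  induction xs generalizing i with
  | nil => simp [scanFirst] at h
  | cons x xs ih =>
    simp only [scanFirst] at h
    split_ifs at h with hx
    · cases h; constructor <;> simp
    · cases hs : scanFirst xs with
      | none => rw [hs] at h; simp at h
      | some i' =>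
        rw [hs] at h; simp at h
        have := ih i' hs
        simp [List.length_cons]
        omega

theorem lastIdx?_bounds (xs : List Int) (j : Int) (h : lastIdx? xs = some j) :
    0 ≤ j ∧ j < (xs.length : Int) := by
  induction xs generalizing j with
  | nil => simp [lastIdx?] at h
  | cons x xs ih =>
    simp only [lastIdx?] at h
    cases hl : lastIdx? xs with
    | some j' =>
      rw [hl] at h; simp at h
      have := ih j' hl
      simp [List.length_cons]; omega
    | none =>
      rw [hl] at h
      split_ifs at h with hx
      cases h; constructor <;> simp

theorem scanFirst_append_single (ys : List Int) (x : Int) :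
    scanFirst (ys ++ [x]) =
      match scanFirst ys with
      | some i => some i
      | none => if x = 1 then some (ys.length : Int) else none := by
  induction ys with
  | nil => simp [scanFirst]
  | cons y ys ih =>
    by_cases hy : y = 1
    · simp [scanFirst, hy]
    · simp only [List.cons_append, scanFirst, if_neg hy, ih]
      cases hs : scanFirst ys with
      | some i => simp
      | none =>
        simp only [Option.map_none]
        split_ifs <;> simp [List.length_cons] <;> omega

theorem scanFirst_reverse (xs : List Int) :
    scanFirst xs.reverse = (lastIdx? xs).map (fun j => (xs.length : Int) - 1 - j) := by
  induction xs with
  | nil => simp [scanFirst, lastIdx?]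
  | cons x xs ih =>
    rw [List.reverse_cons, scanFirst_append_single, ih]
    simp only [lastIdx?]
    cases hl : lastIdx? xs with
    | some j =>
      simp [List.length_cons]; omega
    | none =>
      simp only [Option.map_none]
      split_ifs with hx <;> simp [List.length_cons, hx] <;> omega

theorem fold_char (xs : List Int) (s a b : Int) :
    (PySem.List.enumerate xs s).foldl
      (fun (ac : Int × Int) (ix : Int × Int) =>
        if ix.2 = 1 then (min ac.1 ix.1, max ac.2 ix.1) else ac) (a, b) =
      match scanFirst xs, lastIdx? xs with
      | some i, some j => (min a (s + i), max b (s + j))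
      | _, _ => (a, b) := by
  induction xs generalizing s a b with
  | nil => simp [PySem.List.enumerate_nil, scanFirst, lastIdx?]
  | cons x xs ih =>
    rw [PySem.List.enumerate_cons]
    simp only [List.foldl_cons]
    by_cases hx : x = 1
    · simp only [hx, ih, scanFirst, lastIdx?]
      cases hl : lastIdx? xs with
      | some j =>
        have hsn : scanFirst xs ≠ none := by
          intro h; rw [scanFirst_none_iff] at h; rw [h] at hl; simp at hl
        cases hs : scanFirst xs with
        | none => exact absurd hs hsn
        | some i =>
          have hb1 := scanFirst_bounds xs i hs
          have hb2 := lastIdx?_bounds xs j hl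
          simp only [Option.map_some, reduceIte]
          rw [Prod.mk.injEq]
          constructor <;> omega
      | none =>
        have hs : scanFirst xs = none := by rw [scanFirst_none_iff, hl]
        simp [hs]
    · simp only [ih, scanFirst, lastIdx?, if_neg hx]
      cases hl : lastIdx? xs with
      | some j =>
        have hsn : scanFirst xs ≠ none := by
          intro h; rw [scanFirst_none_iff] at h; rw [h] at hl; simp at hl
        cases hs : scanFirst xs with
        | none => exact absurd hs hsn
        | some i =>
          simp only [Option.map_some]
          rw [Prod.mk.injEq]
          constructor <;> omega
      | none =>
        have hs : scanFirst xs = none := by rw [scanFirst_none_iff, hl]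
        simp [hs]

-- ===== VERDICT (by name: the statement is the Claim_ definition above) =====
theorem CheckMaxPresence_spec : Claim_equal_CheckMaxPresence := by
  intro schedule maxPresence _
  unfold Spec_CheckMaxPresence CheckMaxPresence CheckMaxPresence_alt
  rw [fold_char, scanFirst_reverse]
  cases hl : lastIdx? schedule with
  | none =>
    have hs : scanFirst schedule = none := by rw [scanFirst_none_iff, hl]
    simp [hs]
  | some j =>
    have hsn : scanFirst schedule ≠ none := by
      intro h; rw [scanFirst_none_iff] at h; rw [h] at hl; simp at hl
    cases hs : scanFirst schedule with
    | none => exact absurd hs hsn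
    | some i =>
      have hb1 := scanFirst_bounds schedule i hs
      have hb2 := lastIdx?_bounds schedule j hl
      simp only [Option.map_some, Option.getD_some]
      rw [decide_eq_decide]
      omega
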